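-- pv_equiv track=rewrite | github.com/mdefrance/AutoCarver | AutoCarver/combinations/utils/combinations.py | combinations_at_index
-- ===== SOURCE A (Python) =====
-- from typing import Any, Generator
--
-- def combinations_at_index(
--     start_index: int, elements: list[Any], remaining_groups: int
-- ) -> Generator[list[Any], int, int]:
--     """Gets all possible combinations of sizes up to the last element of a list"""
--
--     # iterating over each possible length of groups
--     for size in range(1, len(elements) + 1):
--         next_index = start_index + size  # index from which to start the next group
--
--         # checking that next index is not off the elements list
--         if next_index < len(elements) + 1:
--             # checking that there are remaining groups or that it is the last group
--             if (remaining_groups > 1) | (next_index == len(elements)):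
--                 combination = list(elements[start_index:next_index])
--                 yield (combination, next_index, remaining_groups - 1)
-- ===== SOURCE B (Python) =====
-- def combinations_at_index(start_index, elements, remaining_groups):
--     """Prefix-accumulator walk over element indices: extend the running combination
--     one element at a time instead of recomputing a slice for each size."""
--     n = len(elements)
--     combination = []
--     for i in range(start_index, n):
--         combination.append(elements[i])
--         next_index = i + 1
--         if remaining_groups > 1 or next_index == n:
--             yield (list(combination), next_index, remaining_groups - 1)
-- ===== Notes on version B (the rewrite author's own statement) =====
-- stated objective: alternative
-- what changed: Replaces A's size-indexed loop, which recomputes a slice and re-checks two bounds every iteration, with a single walk over element indices that extends a running prefix accumulator one element at a time (no slicing, no per-size bound check).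
-- outside the precondition, e.g. on combinations_at_index(-1, [5], 2): A returns [([], 0, 1)], B returns [([5], 0, 1), ([5, 5], 1, 1)]; on combinations_at_index(-3, [5], 2): A returns [([], -2, 1)], B raises IndexError
import Mathlib
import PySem

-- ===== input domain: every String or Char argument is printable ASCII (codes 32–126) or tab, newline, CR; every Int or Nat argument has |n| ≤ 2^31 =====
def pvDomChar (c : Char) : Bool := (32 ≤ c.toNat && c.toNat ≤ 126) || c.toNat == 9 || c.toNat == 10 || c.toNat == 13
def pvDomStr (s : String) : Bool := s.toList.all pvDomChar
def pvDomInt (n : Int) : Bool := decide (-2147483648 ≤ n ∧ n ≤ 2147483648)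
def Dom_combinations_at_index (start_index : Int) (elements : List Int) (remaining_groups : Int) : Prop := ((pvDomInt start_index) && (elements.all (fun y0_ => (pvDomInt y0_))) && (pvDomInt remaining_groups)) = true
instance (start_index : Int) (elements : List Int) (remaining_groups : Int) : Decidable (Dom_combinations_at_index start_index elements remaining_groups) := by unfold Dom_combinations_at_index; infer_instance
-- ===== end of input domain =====

-- B replaces A's size-indexed slicing loop by a single index walk extending a running
-- prefix accumulator (alternative decomposition, no slicing; same cost).

-- ===== PORT A =====
-- literal port: for size in range(1, len+1): next_index = s+size; nested guards; append the slice
def combinations_at_index (start_index : Int) (elements : List Int) (remaining_groups : Int) : List (List Int × Int × Int) :=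
  (PySem.List.pyRange 1 ((elements.length : Int) + 1) 1).foldl
    (fun acc size =>
      let next_index := start_index + size
      if next_index < (elements.length : Int) + 1 then
        if remaining_groups > 1 ∨ next_index = (elements.length : Int) then
          acc ++ [(PySem.List.slice elements (some start_index) (some next_index), next_index, remaining_groups - 1)]
        else acc
      else acc) []

-- ===== PORT B =====
-- literal port of Source B: foldl over range(start_index, n) carrying (combination, out);
-- elements[i] is ported as (pyGet? ...).getD 0 — exact for 0 ≤ i < len, the only accesses
-- reachable under Pre_ (Python B raises IndexError only outside Pre_).
def combinations_at_index_alt (start_index : Int) (elements : List Int) (remaining_groups : Int) : List (List Int × Int × Int) :=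
  -- range start clamped to -len: for start_index < -len Python B raises IndexError on its
  -- first access (outside Pre_); the clamp only keeps the port total and fast there and
  -- changes nothing for start_index ≥ -len
  ((PySem.List.pyRange (max start_index (-(elements.length : Int))) (elements.length : Int) 1).foldl
    (fun st i =>
      let combination := st.1 ++ [(PySem.List.pyGet? elements i).getD 0]
      let next_index := i + 1
      if remaining_groups > 1 ∨ next_index = (elements.length : Int) then
        (combination, st.2 ++ [(combination, next_index, remaining_groups - 1)])
      else (combination, st.2))
    ([], [])).2

-- ===== PRECONDITION & SPEC =====
-- Pre_ excludes negative start_index, a corner no caller exercises: there Python's slice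
-- wraparound makes A yield accidental empty combinations while B's positional indexing
-- wraps differently or raises IndexError, and neither value is specified behaviour.
def Pre_combinations_at_index (start_index : Int) (elements : List Int) (remaining_groups : Int) : Prop :=
  0 ≤ start_index
instance (start_index : Int) (elements : List Int) (remaining_groups : Int) : Decidable (Pre_combinations_at_index start_index elements remaining_groups) := by unfold Pre_combinations_at_index; infer_instance

def pvWitness_combinations_at_index : Int × List Int × Int := (1, [1, 2, 3], 2)

def Spec_combinations_at_index (start_index : Int) (elements : List Int) (remaining_groups : Int) (out : List (List Int × Int × Int)) : Prop := out = combinations_at_index_alt start_index elements remaining_groups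
instance (start_index : Int) (elements : List Int) (remaining_groups : Int) (out : List (List Int × Int × Int)) : Decidable (Spec_combinations_at_index start_index elements remaining_groups out) := by unfold Spec_combinations_at_index; infer_instance

-- ===== CLAIM (what is proved, stated in full; the proofs are below) =====
def Claim_equal_combinations_at_index : Prop := ∀ (start_index : Int) (elements : List Int) (remaining_groups : Int), Dom_combinations_at_index start_index elements remaining_groups → Pre_combinations_at_index start_index elements remaining_groups → Spec_combinations_at_index start_index elements remaining_groups (combinations_at_index start_index elements remaining_groups)

-- ===== LEMMAS AND PROOFS =====

lemma pv_filter_le_aux (c : Int) : ∀ (n : Nat) (a : Int),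
    (PySem.List.pyRange a (a + n) 1).filter (fun x => decide (x ≤ c))
      = PySem.List.pyRange a (min (a + n) (c + 1)) 1 := by
  intro n
  induction n with
  | zero =>
      intro a
      rw [PySem.List.pyRange_one_eq_nil (by omega), PySem.List.pyRange_one_eq_nil (by omega)]
      simp
  | succ k ih =>
      intro a
      have h2 : (a + ((k + 1 : Nat) : Int)) = (a + 1) + (k : Int) := by push_cast; ring
      rw [h2, PySem.List.pyRange_one_cons (show a < a + 1 + (k : Int) by omega),
          List.filter_cons, ih (a + 1)]
      by_cases hac : a ≤ c
      · rw [if_pos (by simpa using hac),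
            ← PySem.List.pyRange_one_cons (show a < min (a + 1 + (k : Int)) (c + 1) by omega)]
      · rw [if_neg (by simpa using hac),
            PySem.List.pyRange_one_eq_nil (show min (a + 1 + (k : Int)) (c + 1) ≤ a + 1 by omega),
            PySem.List.pyRange_one_eq_nil (show min (a + 1 + (k : Int)) (c + 1) ≤ a by omega)]

lemma pv_filter_le (c a b : Int) :
    (PySem.List.pyRange a b 1).filter (fun x => decide (x ≤ c))
      = PySem.List.pyRange a (min b (c + 1)) 1 := by
  by_cases hab : a ≤ b
  · have : b = a + ((b - a).toNat : Int) := by omega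
    rw [this, pv_filter_le_aux c (b - a).toNat a]
  · rw [PySem.List.pyRange_one_eq_nil (by omega), PySem.List.pyRange_one_eq_nil (by omega)]
    simp

lemma pv_map_shift {α : Type} (t a b : Int) (f : Int → α) :
    (PySem.List.pyRange a b 1).map (fun x => f (t + x))
      = (PySem.List.pyRange (t + a) (t + b) 1).map f := by
  rw [PySem.List.pyRange_one, PySem.List.pyRange_one]
  have : (t + b - (t + a)) = b - a := by ring
  rw [this]
  simp only [List.map_map]
  apply List.map_congr_left
  intro k _
  simp only [Function.comp_apply]
  ring_nf

-- the common normal form both ports are reduced to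
def pvCommon (s : Int) (els : List Int) (rg : Int) : List (List Int × Int × Int) :=
  ((PySem.List.pyRange (s + 1) ((els.length : Int) + 1) 1).filter
      (fun j => decide (rg > 1 ∨ j = (els.length : Int)))).map
    (fun j => ((els.drop s.toNat).take (j - s).toNat, j, rg - 1))

lemma pv_a_eq_common (s : Int) (els : List Int) (rg : Int) (hs : 0 ≤ s) :
    combinations_at_index s els rg = pvCommon s els rg := by
  unfold combinations_at_index pvCommon
  set n : Int := (els.length : Int) with hn
  have hcongr : (PySem.List.pyRange 1 (n + 1) 1).foldl
      (fun acc size =>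
        let next_index := s + size
        if next_index < n + 1 then
          if rg > 1 ∨ next_index = n then
            acc ++ [(PySem.List.slice els (some s) (some next_index), next_index, rg - 1)]
          else acc
        else acc) []
      = (PySem.List.pyRange 1 (n + 1) 1).foldl
      (fun acc size =>
        if (s + size ≤ n ∧ (rg > 1 ∨ s + size = n)) then
          acc ++ [(PySem.List.slice els (some s) (some (s + size)), s + size, rg - 1)]
        else acc) [] := by
    apply PySem.List.foldl_congr_mem
    intro acc x _
    simp only []
    split_ifs with h1 h2 h3 h3 <;> first | rfl | omega
  rw [hcongr, PySem.List.foldl_append_ite, List.nil_append]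
  have hsplit : (PySem.List.pyRange 1 (n + 1) 1).filter
      (fun size => decide (s + size ≤ n ∧ (rg > 1 ∨ s + size = n)))
      = ((PySem.List.pyRange 1 (n + 1) 1).filter (fun size => decide (s + size ≤ n))).filter
          (fun size => decide (rg > 1 ∨ s + size = n)) := by
    rw [List.filter_filter]
    apply List.filter_congr
    intro x _
    by_cases h1 : s + x ≤ n <;> by_cases h2 : rg > 1 ∨ s + x = n <;> simp [h1, h2]
  rw [hsplit]
  have hshift1 : (PySem.List.pyRange 1 (n + 1) 1).filter (fun size => decide (s + size ≤ n))
      = (PySem.List.pyRange 1 (n + 1) 1).filter (fun size => decide (size ≤ n - s)) := by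
    apply List.filter_congr; intro x _; simp; omega
  rw [hshift1, pv_filter_le (n - s) 1 (n + 1)]
  have hmin : min (n + 1) (n - s + 1) = n + 1 - s := by omega
  rw [hmin]
  -- turn the size-indexed filter+map into a j-indexed one via the shift
  have hfm : ∀ (l : List Int),
      (l.filter (fun size => decide (rg > 1 ∨ s + size = n))).map
        (fun size => (PySem.List.slice els (some s) (some (s + size)), s + size, rg - 1))
      = ((l.map (fun size => s + size)).filter (fun j => decide (rg > 1 ∨ j = n))).map
        (fun j => (PySem.List.slice els (some s) (some j), j, rg - 1)) := by
    intro l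
    rw [List.filter_map, List.map_map]
    rfl
  rw [hfm]
  have hshift2 : (PySem.List.pyRange 1 (n + 1 - s) 1).map (fun size => s + size)
      = PySem.List.pyRange (s + 1) (n + 1) 1 := by
    have h := pv_map_shift s 1 (n + 1 - s) (fun j => j)
    simp only [List.map_id'] at h
    rw [show s + (n + 1 - s) = n + 1 by ring] at h
    exact h
  rw [hshift2]
  apply List.map_congr_left
  intro j hj
  have hj' := (PySem.List.mem_pyRange_one).1 (List.mem_of_mem_filter hj)
  have h0j : 0 ≤ j := by omega
  rw [PySem.List.slice_toNat els hs h0j]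
  have : j.toNat - s.toNat = (j - s).toNat := by omega
  rw [this]

-- the loop body of B's port, named so the induction can treat it opaquely
def pvStep (els : List Int) (rg : Int) (st : List Int × List (List Int × Int × Int)) (j : Int) : List Int × List (List Int × Int × Int) :=
  let combination := st.1 ++ [(PySem.List.pyGet? els j).getD 0]
  let next_index := j + 1
  if rg > 1 ∨ next_index = (els.length : Int) then
    (combination, st.2 ++ [(combination, next_index, rg - 1)])
  else (combination, st.2)

lemma pv_foldl_eq (els : List Int) (rg : Int) : ∀ (k : Nat) (i : Int) (p : List Int) (acc : List (List Int × Int × Int)),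
    0 ≤ i → ((els.length : Int) - i).toNat ≤ k →
    ((PySem.List.pyRange i (els.length : Int) 1).foldl (pvStep els rg) (p, acc)).2
      = acc ++ ((PySem.List.pyRange (i + 1) ((els.length : Int) + 1) 1).filter
            (fun j => decide (rg > 1 ∨ j = (els.length : Int)))).map
          (fun j => (p ++ (els.drop i.toNat).take (j - i).toNat, j, rg - 1)) := by
  intro k
  induction k with
  | zero =>
      intro i p acc hi hk
      rw [PySem.List.pyRange_one_eq_nil (by omega),
          PySem.List.pyRange_one_eq_nil (show (els.length : Int) + 1 ≤ i + 1 by omega)]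
      simp
  | succ m ih =>
      intro i p acc hi hk
      by_cases hni : (els.length : Int) ≤ i
      · rw [PySem.List.pyRange_one_eq_nil (by omega),
            PySem.List.pyRange_one_eq_nil (show (els.length : Int) + 1 ≤ i + 1 by omega)]
        simp
      · have hilt : i < (els.length : Int) := by omega
        have hitn : i.toNat < els.length := by omega
        have hget : (PySem.List.pyGet? els i).getD 0 = els[i.toNat] := by
          rw [PySem.List.pyGet?_eq_some_getElem els hi hilt]; rfl
        have hdrop : els.drop i.toNat = els[i.toNat] :: els.drop (i.toNat + 1) :=
          List.drop_eq_getElem_cons hitn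
        have hhead : (els.drop i.toNat).take (i + 1 - i).toNat = [els[i.toNat]] := by
          have : (i + 1 - i) = (1 : Int) := by ring
          rw [this, hdrop]; rfl
        have htail : ∀ acc' : List (List Int × Int × Int),
            ((PySem.List.pyRange (i + 1) (els.length : Int) 1).foldl (pvStep els rg) (p ++ [els[i.toNat]], acc')).2
            = acc' ++ ((PySem.List.pyRange (i + 1 + 1) ((els.length : Int) + 1) 1).filter
                (fun j => decide (rg > 1 ∨ j = (els.length : Int)))).map
              (fun j => (p ++ (els.drop i.toNat).take (j - i).toNat, j, rg - 1)) := by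
          intro acc'
          rw [ih (i + 1) (p ++ [els[i.toNat]]) acc' (by omega) (by omega)]
          congr 1
          apply List.map_congr_left
          intro j hj
          have hj2 := (PySem.List.mem_pyRange_one).1 (List.mem_of_mem_filter hj)
          have h2 : (i + 1).toNat = i.toNat + 1 := by omega
          have h3 : (j - i).toNat = (j - (i + 1)).toNat + 1 := by omega
          rw [h2, h3, hdrop, List.take_succ_cons, List.append_assoc, List.singleton_append]
        rw [PySem.List.pyRange_one_cons hilt, List.foldl_cons,
            PySem.List.pyRange_one_cons (show i + 1 < (els.length : Int) + 1 by omega),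
            List.filter_cons]
        by_cases hg : rg > 1 ∨ i + 1 = (els.length : Int)
        · have hstep : pvStep els rg (p, acc) i
              = (p ++ [els[i.toNat]], acc ++ [(p ++ [els[i.toNat]], i + 1, rg - 1)]) := by
            unfold pvStep
            simp only [hget, if_pos hg]
          rw [hstep, htail (acc ++ [(p ++ [els[i.toNat]], i + 1, rg - 1)]),
              if_pos (by simpa using hg), List.map_cons, hhead]
          simp
        · have hstep : pvStep els rg (p, acc) i = (p ++ [els[i.toNat]], acc) := by
            unfold pvStep
            simp only [hget, if_neg hg]
          rw [hstep, htail acc, if_neg (by simpa using hg)]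

lemma pv_b_eq_common (s : Int) (els : List Int) (rg : Int) (hs : 0 ≤ s) :
    combinations_at_index_alt s els rg = pvCommon s els rg := by
  have hdef : combinations_at_index_alt s els rg
      = ((PySem.List.pyRange (max s (-(els.length : Int))) (els.length : Int) 1).foldl (pvStep els rg) ([], [])).2 := rfl
  have hmax : max s (-(els.length : Int)) = s := by omega
  rw [hdef, hmax, pv_foldl_eq els rg ((els.length : Int) - s).toNat s [] [] hs (le_refl _)]
  unfold pvCommon
  simp

-- ===== VERDICT (by name: the statement is the Claim_ definition above) =====
theorem combinations_at_index_spec : Claim_equal_combinations_at_index := by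
  intro s els rg _ hpre
  unfold Spec_combinations_at_index
  rw [pv_a_eq_common s els rg hpre, pv_b_eq_common s els rg hpre]
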